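-- pv_equiv track=rewrite | github.com/karengs04/TeoriaDeLaInformaci-n | main.py | build_shannon_fano_tree
-- ===== SOURCE A (Python) =====
-- def build_shannon_fano_tree(message):
--     def divide(nodes):
--         if len(nodes) <= 1:
--             return nodes
--         mid = len(nodes) // 2
--         for node in nodes[:mid]:
--             node[1] += "0"
--         for node in nodes[mid:]:
--             node[1] += "1"
--         return divide(nodes[:mid]) + divide(nodes[mid:])
--
--     symbol_freq = {}
--     for char in message:
--         if char in symbol_freq:
--             symbol_freq[char] += 1
--         else:
--             symbol_freq[char] = 1
--
--     nodes = [[char, ""] for char in symbol_freq.keys()]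
--     sorted_nodes = sorted(nodes, key=lambda x: symbol_freq[x[0]], reverse=True)
--     shannon_fano_tree = divide(sorted_nodes)
--
--     return sorted(shannon_fano_tree, key=lambda x: x[0])
-- ===== SOURCE B (Python) =====
-- def build_shannon_fano_tree(message):
--     freq = {}
--     for c in message:
--         freq[c] = freq.get(c, 0) + 1
--     order = sorted(freq.keys(), key=lambda c: freq[c], reverse=True)
--     n = len(order)
--     result = []
--     for i, c in enumerate(order):
--         code = ""
--         lo, hi = 0, n
--         while hi - lo > 1:
--             mid = lo + (hi - lo) // 2
--             if i < mid:
--                 code += "0"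
--                 hi = mid
--             else:
--                 code += "1"
--                 lo = mid
--         result.append([c, code])
--     return sorted(result, key=lambda x: x[0])
-- ===== Notes on version B (the rewrite author's own statement) =====
-- stated objective: alternative
-- what changed: Replaces the mutating recursive divide() over list slices by a per-symbol loop that computes each symbol's code directly as its binary-split path (lo/hi midpoint descent over the sorted index), with no recursion, no slicing and no in-place mutation.
import Mathlib
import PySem

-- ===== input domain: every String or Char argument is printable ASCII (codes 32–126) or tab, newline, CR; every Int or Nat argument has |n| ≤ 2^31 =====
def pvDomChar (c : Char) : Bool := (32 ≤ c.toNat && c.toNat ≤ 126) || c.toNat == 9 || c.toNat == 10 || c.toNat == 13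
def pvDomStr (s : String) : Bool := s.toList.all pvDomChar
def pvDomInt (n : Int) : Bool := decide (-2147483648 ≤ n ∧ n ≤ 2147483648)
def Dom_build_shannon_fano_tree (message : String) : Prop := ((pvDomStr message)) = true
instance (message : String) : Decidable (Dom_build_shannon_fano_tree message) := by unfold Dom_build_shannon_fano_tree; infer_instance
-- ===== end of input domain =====

-- B replaces A's mutating recursive median-split over list slices by a per-symbol midpoint-descent
-- loop that computes each code directly (alternative decomposition; same cost, no recursion/mutation).


-- ===== PORT A =====
-- Python's nodes are mutable [char, code] lists; characters are 1-char strings, ported as Char, and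
-- the code strings as List Char (exact: appending "0"/"1" is appending the char). divide() mutates
-- the codes of both halves and then recurses on the (shared-reference) slices; ported purely by
-- applying the append to each half before recursing. len(nodes)//2 on a Python length is Nat division.
def pvA_divide (nodes : List (Char × List Char)) : List (Char × List Char) :=
  if nodes.length ≤ 1 then nodes
  else
    pvA_divide ((nodes.take (nodes.length / 2)).map (fun p => (p.1, p.2 ++ ['0']))) ++
    pvA_divide ((nodes.drop (nodes.length / 2)).map (fun p => (p.1, p.2 ++ ['1'])))
termination_by nodes.length
decreasing_by
  · simp only [List.length_map, List.length_take]; omega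
  · simp only [List.length_map, List.length_drop]; omega

-- the final sorted(key=x[0]) compares 1-char strings, ported as the Char key (exact for single chars)
def build_shannon_fano_tree (message : String) : List (List String) :=
  let symbol_freq := message.toList.foldl
    (fun (d : PySem.Dict Char Int) c =>
      if d.contains c then d.insert c (d.getD c 0 + 1) else d.insert c 1)
    PySem.Dict.empty
  let nodes := symbol_freq.keys.map (fun c => (c, ([] : List Char)))
  let sorted_nodes := PySem.List.sorted nodes (fun x => symbol_freq.getD x.1 0) true
  let tree := pvA_divide sorted_nodes
  (PySem.List.sorted tree (fun x => x.1) false).map (fun p => [String.ofList [p.1], String.ofList p.2])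

-- ===== PORT B =====
-- the while loop of Source B; lo, hi, i, mid are indices 0..n, always nonnegative with lo ≤ hi, so they
-- are ported as Nat ((hi-lo)//2 = Nat division, hi-lo>1 = Nat subtraction: exact here)
def pvB_loop (i lo hi : Nat) (code : List Char) : List Char :=
  if 1 < hi - lo then
    if i < lo + (hi - lo) / 2 then pvB_loop i lo (lo + (hi - lo) / 2) (code ++ ['0'])
    else pvB_loop i (lo + (hi - lo) / 2) hi (code ++ ['1'])
  else code
termination_by hi - lo
decreasing_by
  · omega
  · omega

-- enumerate(order) yields (i, c) with i = 0..n-1 ≥ 0: ported as List.zipIdx (pairs (c, i), Nat index)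
def build_shannon_fano_tree_alt (message : String) : List (List String) :=
  let freq := message.toList.foldl
    (fun (d : PySem.Dict Char Int) c => d.insert c (d.getD c 0 + 1)) PySem.Dict.empty
  let order := PySem.List.sorted freq.keys (fun c => freq.getD c 0) true
  let n := order.length
  let result := (order.zipIdx).foldl (fun acc q => acc ++ [(q.1, pvB_loop q.2 0 n [])]) []
  (PySem.List.sorted result (fun x => x.1) false).map (fun p => [String.ofList [p.1], String.ofList p.2])

-- ===== PRECONDITION & SPEC =====
def Spec_build_shannon_fano_tree (message : String) (out : List (List String)) : Prop := out = build_shannon_fano_tree_alt message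
instance (message : String) (out : List (List String)) : Decidable (Spec_build_shannon_fano_tree message out) := by unfold Spec_build_shannon_fano_tree; infer_instance

-- ===== CLAIM (what is proved, stated in full; the proofs are below) =====
def Claim_equal_build_shannon_fano_tree : Prop := ∀ (message : String), Dom_build_shannon_fano_tree message → Spec_build_shannon_fano_tree message (build_shannon_fano_tree message)

-- ===== LEMMAS AND PROOFS =====

-- the split path of index i in a block of n sorted symbols (characterises both programs' codes)
def pvPath (n i : Nat) : List Char :=
  if n ≤ 1 then []
  else if i < n / 2 then '0' :: pvPath (n / 2) i
  else '1' :: pvPath (n - n / 2) (i - n / 2)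
termination_by n
decreasing_by
  · omega
  · omega

lemma pv_insertBy_map {α β : Type} (p : β → β → Bool) (f : α → β) (x : α) :
    ∀ ys : List α, PySem.List.insertBy p (f x) (ys.map f)
      = (PySem.List.insertBy (fun a b => p (f a) (f b)) x ys).map f
  | [] => by simp [PySem.List.insertBy]
  | y :: ys => by
      simp only [List.map_cons, PySem.List.insertBy]
      by_cases h : p (f x) (f y) = true
      · simp [h]
      · simp [h, pv_insertBy_map p f x ys]

lemma pv_foldl_insertBy_map {α β : Type} (p : β → β → Bool) (f : α → β) :
    ∀ (xs : List α) (acc : List α),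
      List.foldl (fun acc x => PySem.List.insertBy p x acc) (acc.map f) (xs.map f)
        = (List.foldl (fun acc x => PySem.List.insertBy (fun a b => p (f a) (f b)) x acc) acc xs).map f
  | [], _ => rfl
  | x :: xs, acc => by
      simp only [List.map_cons, List.foldl_cons]
      rw [pv_insertBy_map p f x acc]
      exact pv_foldl_insertBy_map p f xs _

lemma pv_sorted_map {α β κ : Type} [LT κ] [DecidableLT κ] (f : α → β) (key : β → κ) (xs : List α) :
    PySem.List.sorted (xs.map f) key true
      = (PySem.List.sorted xs (fun x => key (f x)) true).map f := by
  rw [PySem.List.sorted_rev_eq_foldl_insertBy, PySem.List.sorted_rev_eq_foldl_insertBy]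
  exact pv_foldl_insertBy_map (fun a b => decide (key b < key a)) f xs []

lemma pv_divide_eq : ∀ (d : Nat) (nodes : List (Char × List Char)) (k : Nat), nodes.length = d →
    pvA_divide nodes = (nodes.zipIdx k).map (fun q => (q.1.1, q.1.2 ++ pvPath d (q.2 - k))) := by
  intro d
  induction d using Nat.strong_induction_on with
  | _ d IH =>
  intro nodes k hd
  subst hd
  rw [pvA_divide]
  by_cases h1 : nodes.length ≤ 1
  · rw [if_pos h1]
    have hc : ∀ q ∈ nodes.zipIdx k, (q.1.1, q.1.2 ++ pvPath nodes.length (q.2 - k)) = q.1 := by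
      intro q _
      rw [pvPath, if_pos h1]
      simp
    rw [List.map_congr_left hc]
    simp [List.zipIdx_map_fst]
  · rw [if_neg h1]
    have hll : ((nodes.take (nodes.length / 2)).map
        (fun p => (p.1, p.2 ++ (['0'] : List Char)))).length = nodes.length / 2 := by
      simp only [List.length_map, List.length_take]; omega
    have hlr : ((nodes.drop (nodes.length / 2)).map
        (fun p => (p.1, p.2 ++ (['1'] : List Char)))).length = nodes.length - nodes.length / 2 := by
      simp only [List.length_map, List.length_drop]
    rw [IH (nodes.length / 2) (by omega) _ k hll,
        IH (nodes.length - nodes.length / 2) (by omega) _ (k + nodes.length / 2) hlr]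
    conv_rhs => rw [← List.take_append_drop (nodes.length / 2) nodes]
    rw [List.zipIdx_append, List.map_append, List.take_append_drop]
    have htl : (nodes.take (nodes.length / 2)).length = nodes.length / 2 := by
      simp only [List.length_take]; omega
    congr 1
    · rw [List.zipIdx_map, List.map_map]
      apply List.map_congr_left
      rintro ⟨⟨c, cs⟩, i⟩ hq
      have hb := List.mem_zipIdx hq
      rw [htl] at hb
      have hi1 : i - k < nodes.length / 2 := by omega
      dsimp only [Function.comp, Prod.map]
      conv_rhs => rw [pvPath, if_neg h1, if_pos hi1]
      simp
    · rw [htl, List.zipIdx_map, List.map_map]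
      apply List.map_congr_left
      rintro ⟨⟨c, cs⟩, i⟩ hq
      have hb := List.mem_zipIdx hq
      have hi1 : ¬ (i - k < nodes.length / 2) := by omega
      dsimp only [Function.comp, Prod.map]
      conv_rhs => rw [pvPath, if_neg h1, if_neg hi1]
      have h2 : i - (k + nodes.length / 2) = i - k - nodes.length / 2 := by omega
      simp [h2]

lemma pv_loop_eq : ∀ (d : Nat) (lo hi i : Nat) (code : List Char), hi - lo = d → lo ≤ i →
    pvB_loop i lo hi code = code ++ pvPath d (i - lo) := by
  intro d
  induction d using Nat.strong_induction_on with
  | _ d IH =>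
  intro lo hi i code hd hle
  rw [pvB_loop]
  by_cases h1 : 1 < hi - lo
  · rw [if_pos h1]
    have hd2 : ¬ d ≤ 1 := by omega
    by_cases h2 : i < lo + (hi - lo) / 2
    · rw [if_pos h2,
          IH (d / 2) (by omega) lo (lo + (hi - lo) / 2) i _ (by omega) hle]
      conv_rhs => rw [pvPath, if_neg hd2, if_pos (by omega : i - lo < d / 2)]
      simp
    · rw [if_neg h2,
          IH (d - d / 2) (by omega) (lo + (hi - lo) / 2) hi i _ (by omega) (by omega)]
      conv_rhs => rw [pvPath, if_neg hd2, if_neg (by omega : ¬ (i - lo < d / 2))]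
      have h3 : i - (lo + (hi - lo) / 2) = i - lo - d / 2 := by omega
      simp [h3]
  · rw [if_neg h1]
    rw [pvPath, if_pos (by omega : d ≤ 1)]
    simp

-- ===== VERDICT (by name: the statement is the Claim_ definition above) =====
theorem build_shannon_fano_tree_spec : Claim_equal_build_shannon_fano_tree := by
  intro message _
  unfold Spec_build_shannon_fano_tree
  simp only [build_shannon_fano_tree, build_shannon_fano_tree_alt]
  have hfreq : (fun (d : PySem.Dict Char Int) (c : Char) =>
      if d.contains c then d.insert c (d.getD c 0 + 1) else d.insert c 1)
      = (fun (d : PySem.Dict Char Int) (c : Char) => d.insert c (d.getD c 0 + 1)) := by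
    funext d c
    by_cases h : d.contains c = true
    · simp [h]
    · rw [if_neg (by simp [h]),
          PySem.Dict.getD_of_not_contains d 0 (by simpa using h)]
      norm_num
  rw [hfreq]
  set F := message.toList.foldl
    (fun (d : PySem.Dict Char Int) c => d.insert c (d.getD c 0 + 1)) PySem.Dict.empty with hF
  rw [pv_sorted_map (fun c => (c, ([] : List Char))) (fun x => F.getD x.1 0) F.keys]
  set order := PySem.List.sorted F.keys (fun c => F.getD c 0) true with horder
  rw [PySem.List.foldl_append_singleton_eq_map
      (fun q => (q.1, pvB_loop q.2 0 order.length [])) (order.zipIdx) []]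
  rw [pv_divide_eq ((order.map (fun c => (c, ([] : List Char)))).length) _ 0 rfl]
  rw [List.zipIdx_map, List.map_map]
  have hmap : ∀ q ∈ order.zipIdx,
      ((fun q => (q.1.1, q.1.2 ++ pvPath (order.map (fun c => (c, ([] : List Char)))).length (q.2 - 0)))
        ∘ Prod.map (fun c => (c, ([] : List Char))) id) q
      = (q.1, pvB_loop q.2 0 order.length []) := by
    rintro ⟨c, i⟩ _
    rw [pv_loop_eq order.length 0 order.length i [] rfl (Nat.zero_le i)]
    simp [Prod.map]
  rw [List.map_congr_left hmap]
  simp
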